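-- pv_equiv track=rewrite | github.com/drewmylo/aoc_2023 | 13.py | fix_smudge_and_test_smart
-- ===== SOURCE A (Python) =====
-- def fix_smudge(a, b):
--     if a is None or b is None:
--         return None
--     count = 0
--     for i in range(0, len(a)):
--         if a[i] != b[i]:
--             count += 1
--     if count == 1:
--         return a
--
-- def test_for_symmetry(matrix, index):
--     for i in range(0, index + 1):
--         if (index - i) >= 0 and (index + i + 1) < len(matrix):
--             if matrix[index - i] != matrix[index + i + 1]:
--                 return False
--     return True
--
-- def fix_smudge_in_matrix(matrix, index):
--     test_matrix = matrix[:]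
--     for i in range(0, index + 1):
--         if (index - i) >= 0 and (index + i + 1) < len(matrix):
--             a = fix_smudge(matrix[index - i], matrix[index + i + 1])
--             if a is not None:
--                 test_matrix[index - i] = a
--                 test_matrix[index + i + 1] = a
--                 if test_for_symmetry(test_matrix, index):
--                     return test_matrix
--     return None
--
-- def fix_smudge_and_test_smart(matrix, h_factor):
--     score = 0
--     for index in range(0, len(matrix) - 1):
--         if matrix[index] == matrix[index + 1]:
--             fix = fix_smudge_in_matrix(matrix, index)
--             if fix is not None:
--                 matrix = fix
--                 if test_for_symmetry(matrix, index):
--                     score = (index + 1) * h_factor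
--                     break
--     return score
-- ===== SOURCE B (Python) =====
-- def fix_smudge_and_test_smart(matrix, h_factor):
--     # For each fold with equal adjacent rows, compute per mirrored-pair mismatch
--     # counts in one pass (equal rows short-circuit to 0); the fold works iff no
--     # pair has >1 mismatch and some pair has exactly 1 (the smudge fixes then
--     # make the fold symmetric).
--     n = len(matrix)
--     for index in range(n - 1):
--         if matrix[index] == matrix[index + 1]:
--             width = min(index + 1, n - index - 1)
--             counts = [0 if matrix[index - i] == matrix[index + i + 1]
--                       else sum(x != y for x, y in zip(matrix[index - i], matrix[index + i + 1]))
--                       for i in range(width)]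
--             if counts and max(counts) == 1:
--                 return (index + 1) * h_factor
--     return 0
-- ===== Notes on version B (the rewrite author's own statement) =====
-- stated objective: faster
-- what changed: A searches each fold by trying every single-smudge pair, copying and patching the matrix and re-testing full symmetry after every candidate fix; B instead computes the mismatch count of every mirrored pair of the fold in one pass and accepts the fold iff the maximum pair count is exactly 1, which is provably the same acceptance condition.
-- outside the precondition, e.g. on fix_smudge_and_test_smart(['..', '.', '##', '##', '.#.', '.#.', '.#'], -2): A returns -10, B returns -6; on fix_smudge_and_test_smart(['a', 'x', 'x', 'ab'], 1): A returns 0, B returns 0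
import Mathlib
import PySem

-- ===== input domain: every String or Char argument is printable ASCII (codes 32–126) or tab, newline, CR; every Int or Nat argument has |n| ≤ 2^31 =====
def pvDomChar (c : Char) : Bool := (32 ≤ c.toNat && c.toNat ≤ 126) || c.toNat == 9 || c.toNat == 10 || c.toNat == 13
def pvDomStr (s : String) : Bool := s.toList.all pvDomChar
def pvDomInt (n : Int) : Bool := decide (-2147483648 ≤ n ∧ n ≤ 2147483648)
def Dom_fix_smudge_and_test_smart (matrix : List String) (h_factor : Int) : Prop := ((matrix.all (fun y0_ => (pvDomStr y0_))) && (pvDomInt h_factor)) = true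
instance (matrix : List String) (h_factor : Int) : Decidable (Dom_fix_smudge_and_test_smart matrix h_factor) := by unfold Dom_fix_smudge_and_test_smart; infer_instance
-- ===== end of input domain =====

-- B replaces A's try-each-smudge-then-retest-symmetry search (and its matrix copies) by one
-- pass per fold computing the mismatch count of every mirrored pair; measured faster (objective: faster).

-- ===== PORT A =====

-- fix_smudge(a, b): counts positions i < len(a) where a[i] != b[i]; exact when len(b) >= len(a)
-- (when len(b) < len(a) Python raises IndexError at i = len(b); Pre_ keeps such calls unreachable).
def pvCountA (a b : String) : Int :=
  (PySem.List.pyRange 0 (PySem.Str.len a) 1).foldl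
    (fun c i => if PySem.Str.pyGet? a i ≠ PySem.Str.pyGet? b i then c + 1 else c) 0

def pvFixSmudge (a b : String) : Option String :=
  if pvCountA a b = 1 then some a else none

-- test_for_symmetry(matrix, index)
def pvTestSym (matrix : List String) (index : Int) : Bool :=
  (PySem.List.pyRange 0 (index + 1) 1).all (fun i =>
    if 0 ≤ index - i ∧ index + i + 1 < (matrix.length : Int) then
      PySem.List.pyGetD matrix (index - i) "" == PySem.List.pyGetD matrix (index + i + 1) ""
    else true)

-- the loop body of fix_smudge_in_matrix; tm is the (mutated) test_matrix
def pvFixLoop (matrix : List String) (index : Int) : List String → List Int → Option (List String)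
  | _, [] => none
  | tm, i :: rest =>
    if 0 ≤ index - i ∧ index + i + 1 < (matrix.length : Int) then
      match pvFixSmudge (PySem.List.pyGetD matrix (index - i) "")
                        (PySem.List.pyGetD matrix (index + i + 1) "") with
      | some a =>
        let tm' := PySem.List.pySetD (PySem.List.pySetD tm (index - i) a) (index + i + 1) a
        if pvTestSym tm' index then some tm' else pvFixLoop matrix index tm' rest
      | none => pvFixLoop matrix index tm rest
    else pvFixLoop matrix index tm rest

def pvFixSmudgeInMatrix (matrix : List String) (index : Int) : Option (List String) :=
  pvFixLoop matrix index matrix (PySem.List.pyRange 0 (index + 1) 1)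

-- the outer for-loop; score = 0 unless the loop breaks
def pvLoopA (h_factor : Int) : List String → List Int → Int
  | _, [] => 0
  | m, index :: rest =>
    if PySem.List.pyGetD m index "" == PySem.List.pyGetD m (index + 1) "" then
      match pvFixSmudgeInMatrix m index with
      | some fix => if pvTestSym fix index then (index + 1) * h_factor
                    else pvLoopA h_factor fix rest
      | none => pvLoopA h_factor m rest
    else pvLoopA h_factor m rest

def fix_smudge_and_test_smart (matrix : List String) (h_factor : Int) : Int :=
  pvLoopA h_factor matrix (PySem.List.pyRange 0 ((matrix.length : Int) - 1) 1)

-- ===== PORT B =====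

-- 0 if a == b else sum(x != y for x, y in zip(a, b))
def pvCountB (a b : String) : Int :=
  if a = b then 0
  else ((a.toList.zip b.toList).map (fun p => if p.1 ≠ p.2 then (1 : Int) else 0)).sum

-- the per-fold list of mirrored-pair mismatch counts
def pvCountsB (matrix : List String) (index width : Int) : List Int :=
  (PySem.List.pyRange 0 width 1).map (fun i =>
    pvCountB (PySem.List.pyGetD matrix (index - i) "")
             (PySem.List.pyGetD matrix (index + i + 1) ""))

def pvLoopB (matrix : List String) (h_factor : Int) : List Int → Int
  | [] => 0
  | index :: rest =>
    if PySem.List.pyGetD matrix index "" == PySem.List.pyGetD matrix (index + 1) "" then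
      let counts := pvCountsB matrix index (min (index + 1) ((matrix.length : Int) - index - 1))
      if counts ≠ [] ∧ PySem.List.max? counts (fun x => x) = some 1 then
        (index + 1) * h_factor
      else pvLoopB matrix h_factor rest
    else pvLoopB matrix h_factor rest

def fix_smudge_and_test_smart_alt (matrix : List String) (h_factor : Int) : Int :=
  pvLoopB matrix h_factor (PySem.List.pyRange 0 ((matrix.length : Int) - 1) 1)

-- ===== PRECONDITION & SPEC =====
-- Pre_ excludes matrices in which some fold whose two adjacent rows are equal has a mirrored
-- pair of rows of different lengths: on such ragged input A may raise IndexError in fix_smudge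
-- (and where it happens to return, comparing only a length-truncated prefix is accidental).
def Pre_fix_smudge_and_test_smart (matrix : List String) (h_factor : Int) : Prop :=
  ∀ idx : Nat, idx < matrix.length → ∀ i : Nat, i < matrix.length →
    (idx + 1 < matrix.length ∧ i ≤ idx ∧ idx + i + 1 < matrix.length ∧
      matrix.getD idx "" = matrix.getD (idx + 1) "") →
    (matrix.getD (idx - i) "").toList.length = (matrix.getD (idx + i + 1) "").toList.length
instance (matrix : List String) (h_factor : Int) : Decidable (Pre_fix_smudge_and_test_smart matrix h_factor) := by
  unfold Pre_fix_smudge_and_test_smart; infer_instance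

def pvWitness_fix_smudge_and_test_smart : List String × Int := (["#.", "..", "#.", "#."], 3)

def Spec_fix_smudge_and_test_smart (matrix : List String) (h_factor : Int) (out : Int) : Prop := out = fix_smudge_and_test_smart_alt matrix h_factor
instance (matrix : List String) (h_factor : Int) (out : Int) : Decidable (Spec_fix_smudge_and_test_smart matrix h_factor out) := by unfold Spec_fix_smudge_and_test_smart; infer_instance

-- ===== CLAIM (what is proved, stated in full; the proofs are below) =====
def Claim_equal_fix_smudge_and_test_smart : Prop := ∀ (matrix : List String) (h_factor : Int), Dom_fix_smudge_and_test_smart matrix h_factor → Pre_fix_smudge_and_test_smart matrix h_factor → Spec_fix_smudge_and_test_smart matrix h_factor (fix_smudge_and_test_smart matrix h_factor)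

-- ===== LEMMAS AND PROOFS =====
-- ===== proof-only helpers =====

-- the top and bottom rows of mirrored pair i around fold idx, and A's mismatch count of that pair
def pvTop (m : List String) (idx i : Nat) : String := m.getD (idx - i) ""
def pvBot (m : List String) (idx i : Nat) : String := m.getD (idx + i + 1) ""
def pvC (m : List String) (idx i : Nat) : Int := pvCountA (pvTop m idx i) (pvBot m idx i)

-- number of mismatching aligned positions of two char lists
def pvMis (l1 l2 : List Char) : Nat := (l1.zip l2).countP (fun p => decide (p.1 ≠ p.2))

-- the matrix A's test_matrix holds after processing pairs 0 .. k-1: every pair with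
-- exactly one mismatch has had its bottom row overwritten by its top row
def pvFixedAt (m : List String) (idx k : Nat) : List String :=
  m.mapIdx (fun p s =>
    if idx < p ∧ p - idx - 1 < k ∧ p ≤ 2 * idx + 1 ∧
       pvCountA (m.getD (2 * idx + 1 - p) "") (m.getD p "") = 1
    then m.getD (2 * idx + 1 - p) "" else s)

lemma str_eq_iff (a b : String) : a = b ↔ a.toList = b.toList := String.ext_iff

lemma countP_range_eq_zip (l1 l2 : List Char) (h : l1.length = l2.length) :
    (List.range l1.length).countP (fun j => decide (l1[j]? ≠ l2[j]?)) = pvMis l1 l2 := by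
  induction l1 generalizing l2 with
  | nil => simp [pvMis]
  | cons x xs ih =>
    cases l2 with
    | nil => simp at h
    | cons y ys =>
      simp only [List.length_cons, List.range_succ_eq_map, List.countP_cons, List.countP_map]
      unfold pvMis
      simp only [List.zip_cons_cons, List.countP_cons]
      have := ih ys (by simpa using h)
      unfold pvMis at this
      simp only [] at *
      simp only [List.getElem?_cons_zero]
      rw [← this]
      congr 1
      simp

lemma pvCountA_eq (a b : String) (h : a.toList.length = b.toList.length) :
    pvCountA a b = (pvMis a.toList b.toList : Int) := by
  unfold pvCountA
  rw [PySem.List.foldl_ite_add_one (p := fun i => PySem.Str.pyGet? a i ≠ PySem.Str.pyGet? b i)]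
  rw [show PySem.Str.len a = ((a.toList.length : Nat) : Int) by simp [PySem.Str.len_eq]]
  rw [PySem.List.pyRange_zero_nat]
  rw [List.countP_map]
  rw [show ((fun i => decide (PySem.Str.pyGet? a i ≠ PySem.Str.pyGet? b i)) ∘ (fun k : Nat => (k : Int)))
        = fun j : Nat => decide (a.toList[j]? ≠ b.toList[j]?) by
      funext j; simp]
  rw [countP_range_eq_zip a.toList b.toList h]
  simp

lemma pvMis_eq_zero_iff (l1 l2 : List Char) (h : l1.length = l2.length) :
    pvMis l1 l2 = 0 ↔ l1 = l2 := by
  unfold pvMis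
  rw [List.countP_eq_zero]
  constructor
  · intro hp
    apply List.ext_getElem h
    intro i h1 h2
    have : (l1[i], l2[i]) ∈ l1.zip l2 := by
      rw [List.mem_iff_getElem]
      exact ⟨i, by simp [h1, ← h], by simp⟩
    simpa using hp _ this
  · rintro rfl p hp
    rw [List.mem_iff_getElem] at hp
    obtain ⟨i, hi, rfl⟩ := hp
    simp

lemma pvCountB_eq (a b : String) (h : a.toList.length = b.toList.length) :
    pvCountB a b = (pvMis a.toList b.toList : Int) := by
  unfold pvCountB
  by_cases hab : a = b
  · rw [if_pos hab]
    have : pvMis a.toList b.toList = 0 :=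
      (pvMis_eq_zero_iff _ _ h).2 (by rw [hab])
    rw [this]; rfl
  · rw [if_neg hab]
    unfold pvMis
    rw [show (fun p : Char × Char => if p.1 ≠ p.2 then (1 : Int) else 0)
          = fun p : Char × Char => if decide (p.1 ≠ p.2) = true then (1 : Int) else 0 by
        funext p; simp]
    rw [PySem.List.sum_map_ite_one_zero]

lemma pvC_nonneg (m : List String) (idx i : Nat)
    (h : (pvTop m idx i).toList.length = (pvBot m idx i).toList.length) :
    0 ≤ pvC m idx i := by
  unfold pvC; rw [pvCountA_eq _ _ h]; positivity

lemma pvC_eq_zero_iff (m : List String) (idx i : Nat)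
    (h : (pvTop m idx i).toList.length = (pvBot m idx i).toList.length) :
    (pvC m idx i = 0 ↔ pvTop m idx i = pvBot m idx i) := by
  unfold pvC; rw [pvCountA_eq _ _ h]
  rw [str_eq_iff, ← pvMis_eq_zero_iff _ _ h]
  omega

lemma length_pvFixedAt (m : List String) (idx k : Nat) :
    (pvFixedAt m idx k).length = m.length := by
  simp [pvFixedAt]

lemma getElem_pvFixedAt (m : List String) (idx k q : Nat) (hq : q < m.length) :
    (pvFixedAt m idx k)[q]'(by rw [length_pvFixedAt]; exact hq) =
      if idx < q ∧ q - idx - 1 < k ∧ q ≤ 2 * idx + 1 ∧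
         pvCountA (m.getD (2 * idx + 1 - q) "") (m.getD q "") = 1
      then m.getD (2 * idx + 1 - q) "" else m[q] := by
  simp [pvFixedAt]

lemma getD_pvFixedAt (m : List String) (idx k q : Nat) (hq : q < m.length) :
    (pvFixedAt m idx k).getD q "" =
      if idx < q ∧ q - idx - 1 < k ∧ q ≤ 2 * idx + 1 ∧
         pvCountA (m.getD (2 * idx + 1 - q) "") (m.getD q "") = 1
      then m.getD (2 * idx + 1 - q) "" else m.getD q "" := by
  rw [List.getD_eq_getElem _ _ (by rw [length_pvFixedAt]; exact hq)]
  rw [getElem_pvFixedAt m idx k q hq]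
  rw [List.getD_eq_getElem _ _ hq]

lemma getD_pvFixedAt_top (m : List String) (idx k i : Nat) (hi : i ≤ idx) (h : idx < m.length) :
    (pvFixedAt m idx k).getD (idx - i) "" = pvTop m idx i := by
  rw [getD_pvFixedAt m idx k _ (by omega)]
  rw [if_neg (by omega)]
  rfl

lemma getD_pvFixedAt_bot (m : List String) (idx k i : Nat) (hi : i ≤ idx)
    (h : idx + i + 1 < m.length) :
    (pvFixedAt m idx k).getD (idx + i + 1) "" =
      if i < k ∧ pvC m idx i = 1 then pvTop m idx i else pvBot m idx i := by
  rw [getD_pvFixedAt m idx k _ h]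
  have e1 : idx + i + 1 - idx - 1 = i := by omega
  have e2 : 2 * idx + 1 - (idx + i + 1) = idx - i := by omega
  simp only [e1, e2]
  by_cases hc : i < k ∧ pvC m idx i = 1
  · rw [if_pos ⟨by omega, hc.1, by omega, hc.2⟩, if_pos hc]; rfl
  · rw [if_neg (by rintro ⟨_, hlt, _, h4⟩; exact hc ⟨hlt, h4⟩), if_neg hc]
    rfl

lemma pvFixedAt_zero (m : List String) (idx : Nat) : pvFixedAt m idx 0 = m := by
  apply List.ext_getElem (by rw [length_pvFixedAt])
  intro q h1 h2
  rw [getElem_pvFixedAt m idx 0 q h2, if_neg (by omega)]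

lemma pvFixedAt_succ_of_not (m : List String) (idx k : Nat)
    (h : ¬ (k ≤ idx ∧ idx + k + 1 < m.length ∧ pvC m idx k = 1)) :
    pvFixedAt m idx (k + 1) = pvFixedAt m idx k := by
  apply List.ext_getElem (by rw [length_pvFixedAt, length_pvFixedAt])
  intro q h1 h2
  rw [length_pvFixedAt] at h1
  rw [getElem_pvFixedAt m idx (k+1) q h1, getElem_pvFixedAt m idx k q h1]
  by_cases hq : q = idx + k + 1
  · subst hq
    have e1 : idx + k + 1 - idx - 1 = k := by omega
    have e2 : 2 * idx + 1 - (idx + k + 1) = idx - k := by omega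
    simp only [e1, e2]
    rw [if_neg (by unfold pvC pvTop pvBot at h; omega), if_neg (by omega)]
  · by_cases hc : idx < q ∧ q - idx - 1 < k ∧ q ≤ 2 * idx + 1 ∧
        pvCountA (m.getD (2 * idx + 1 - q) "") (m.getD q "") = 1
    · rw [if_pos ⟨hc.1, by omega, hc.2.2⟩, if_pos hc]
    · rw [if_neg (by omega), if_neg hc]

lemma pvFixedAt_succ_of_fix (m : List String) (idx k : Nat)
    (hk : k ≤ idx) (_hb : idx + k + 1 < m.length) (hc : pvC m idx k = 1) :
    ((pvFixedAt m idx k).set (idx - k) (pvTop m idx k)).set (idx + k + 1) (pvTop m idx k)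
      = pvFixedAt m idx (k + 1) := by
  apply List.ext_getElem (by simp [length_pvFixedAt])
  intro q h1 h2
  rw [length_pvFixedAt] at h2
  rw [List.getElem_set, List.getElem_set]
  rw [getElem_pvFixedAt m idx (k+1) q h2]
  by_cases hq2 : q = idx + k + 1
  · subst hq2
    rw [if_pos rfl]
    have e2 : 2 * idx + 1 - (idx + k + 1) = idx - k := by omega
    rw [if_pos ⟨by omega, by omega, by omega, by rw [e2]; exact hc⟩, e2]
    rfl
  · rw [if_neg (by omega)]
    by_cases hq1 : q = idx - k
    · subst hq1
      rw [if_pos rfl, if_neg (by omega)]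
      unfold pvTop
      exact List.getD_eq_getElem _ _ (by omega)
    · rw [if_neg (by omega), getElem_pvFixedAt m idx k q h2]
      by_cases hcq : idx < q ∧ q - idx - 1 < k ∧ q ≤ 2 * idx + 1 ∧
          pvCountA (m.getD (2 * idx + 1 - q) "") (m.getD q "") = 1
      · rw [if_pos hcq, if_pos ⟨hcq.1, by omega, hcq.2.2⟩]
      · rw [if_neg hcq, if_neg (by
          rintro ⟨hA, hB, hC, hD⟩
          exact hcq ⟨hA, by omega, hC, hD⟩)]
lemma testSym_iff (tm : List String) (idx : Nat) :
    pvTestSym tm (idx : Int) = true ↔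
      ∀ i : Nat, i ≤ idx → idx + i + 1 < tm.length →
        tm.getD (idx - i) "" = tm.getD (idx + i + 1) "" := by
  unfold pvTestSym
  rw [List.all_eq_true]
  constructor
  · intro hall i hi hb
    have hmem : (i : Int) ∈ PySem.List.pyRange 0 ((idx : Int) + 1) 1 := by
      rw [PySem.List.mem_pyRange_one]; omega
    have := hall _ hmem
    rw [if_pos (by refine ⟨by omega, ?_⟩; omega)] at this
    have e1 : (idx : Int) - (i : Int) = ((idx - i : Nat) : Int) := by omega
    have e2 : (idx : Int) + (i : Int) + 1 = ((idx + i + 1 : Nat) : Int) := by omega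
    rw [e1, e2, PySem.List.pyGetD_natCast, PySem.List.pyGetD_natCast, beq_iff_eq] at this
    exact this
  · intro hp x hx
    rw [PySem.List.mem_pyRange_one] at hx
    by_cases hg : 0 ≤ (idx : Int) - x ∧ (idx : Int) + x + 1 < (tm.length : Int)
    · rw [if_pos hg]
      obtain ⟨i, rfl⟩ : ∃ i : Nat, x = (i : Int) := ⟨x.toNat, by omega⟩
      have e1 : (idx : Int) - (i : Int) = ((idx - i : Nat) : Int) := by omega
      have e2 : (idx : Int) + (i : Int) + 1 = ((idx + i + 1 : Nat) : Int) := by omega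
      rw [e1, e2, PySem.List.pyGetD_natCast, PySem.List.pyGetD_natCast, beq_iff_eq]
      exact hp i (by omega) (by omega)
    · rw [if_neg hg]

lemma fixLoop_some_sym (m : List String) (index : Int) :
    ∀ (L : List Int) (tm r : List String),
      pvFixLoop m index tm L = some r → pvTestSym r index = true := by
  intro L
  induction L with
  | nil => intro tm r h; simp [pvFixLoop] at h
  | cons i rest ih =>
    intro tm r h
    unfold pvFixLoop at h
    by_cases hg : 0 ≤ index - i ∧ index + i + 1 < (m.length : Int)
    · rw [if_pos hg] at h
      cases hfs : pvFixSmudge (PySem.List.pyGetD m (index - i) "")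
          (PySem.List.pyGetD m (index + i + 1) "") with
      | none => rw [hfs] at h; exact ih _ _ h
      | some a =>
        rw [hfs] at h
        simp only at h
        split at h
        · cases h; assumption
        · exact ih _ _ h
    · rw [if_neg hg] at h; exact ih _ _ h

lemma pvFixLoop_cons (m : List String) (index i : Int) (tm : List String) (rest : List Int) :
    pvFixLoop m index tm (i :: rest) =
      if 0 ≤ index - i ∧ index + i + 1 < (m.length : Int) then
        match pvFixSmudge (PySem.List.pyGetD m (index - i) "")
                          (PySem.List.pyGetD m (index + i + 1) "") with
        | some a =>
          let tm' := PySem.List.pySetD (PySem.List.pySetD tm (index - i) a) (index + i + 1) a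
          if pvTestSym tm' index then some tm' else pvFixLoop m index tm' rest
        | none => pvFixLoop m index tm rest
      else pvFixLoop m index tm rest := rfl

lemma fixLoop_char (m : List String) (idx : Nat) (hidx : idx + 1 < m.length)
    (pre : ∀ i : Nat, i ≤ idx → idx + i + 1 < m.length →
      (pvTop m idx i).toList.length = (pvBot m idx i).toList.length) :
    ∀ (d k : Nat), k + d = idx + 1 →
      ((pvFixLoop m (idx : Int) (pvFixedAt m idx k)
          (PySem.List.pyRange (k : Int) ((idx : Int) + 1) 1)).isSome = true
        ↔ ((∀ i : Nat, i ≤ idx → idx + i + 1 < m.length → pvC m idx i ≤ 1) ∧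
           (∃ i : Nat, k ≤ i ∧ i ≤ idx ∧ idx + i + 1 < m.length ∧ pvC m idx i = 1))) := by
  intro d
  induction d with
  | zero =>
    intro k hk
    rw [PySem.List.pyRange_one_eq_nil (by omega)]
    simp only [pvFixLoop, Option.isSome_none]
    constructor
    · intro h; cases h
    · rintro ⟨-, i, h1, h2, -, -⟩; omega
  | succ d ih =>
    intro k hk
    have hkle : k ≤ idx := by omega
    rw [PySem.List.pyRange_one_cons (by omega), pvFixLoop_cons]
    have e1 : (idx : Int) - (k : Int) = ((idx - k : Nat) : Int) := by omega
    have e2 : (idx : Int) + (k : Int) + 1 = ((idx + k + 1 : Nat) : Int) := by omega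
    have etop : PySem.List.pyGetD m ((idx : Int) - (k : Int)) "" = pvTop m idx k := by
      rw [e1, PySem.List.pyGetD_natCast]; rfl
    have ebot : PySem.List.pyGetD m ((idx : Int) + (k : Int) + 1) "" = pvBot m idx k := by
      rw [e2, PySem.List.pyGetD_natCast]; rfl
    have ecast : ((k : Int) + 1) = ((k + 1 : Nat) : Int) := by push_cast; ring
    by_cases hinb : idx + k + 1 < m.length
    · rw [if_pos (by refine ⟨by omega, ?_⟩; omega)]
      rw [etop, ebot]
      by_cases hc : pvC m idx k = 1
      · rw [show pvFixSmudge (pvTop m idx k) (pvBot m idx k) = some (pvTop m idx k) from by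
            unfold pvFixSmudge; exact if_pos hc]
        simp only
        have eset : PySem.List.pySetD
            (PySem.List.pySetD (pvFixedAt m idx k) ((idx : Int) - (k : Int)) (pvTop m idx k))
            ((idx : Int) + (k : Int) + 1) (pvTop m idx k) = pvFixedAt m idx (k + 1) := by
          rw [e1, e2, PySem.List.pySetD_natCast, PySem.List.pySetD_natCast]
          exact pvFixedAt_succ_of_fix m idx k hkle hinb hc
        rw [eset]
        have hsymiff : pvTestSym (pvFixedAt m idx (k + 1)) (idx : Int) = true ↔
            (∀ i : Nat, i ≤ idx → idx + i + 1 < m.length →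
              (i < k + 1 ∧ pvC m idx i = 1) ∨ pvC m idx i = 0) := by
          rw [testSym_iff]
          constructor
          · intro hs i hi hb
            have := hs i hi (by rw [length_pvFixedAt]; exact hb)
            rw [getD_pvFixedAt_top m idx (k+1) i hi (by omega),
                getD_pvFixedAt_bot m idx (k+1) i hi hb] at this
            by_cases hck : i < k + 1 ∧ pvC m idx i = 1
            · exact Or.inl hck
            · rw [if_neg hck] at this
              exact Or.inr ((pvC_eq_zero_iff m idx i (pre i hi hb)).2 this)
          · intro hs i hi hb
            rw [length_pvFixedAt] at hb
            rw [getD_pvFixedAt_top m idx (k+1) i hi (by omega),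
                getD_pvFixedAt_bot m idx (k+1) i hi hb]
            rcases hs i hi hb with hck | h0
            · rw [if_pos hck]
            · rw [if_neg (by rintro ⟨-, h1⟩; omega)]
              exact (pvC_eq_zero_iff m idx i (pre i hi hb)).1 h0
        by_cases hsym : pvTestSym (pvFixedAt m idx (k + 1)) (idx : Int) = true
        · rw [if_pos hsym]
          simp only [Option.isSome_some, true_iff]
          have hs := hsymiff.1 hsym
          refine ⟨fun i hi hb => ?_, ⟨k, le_refl _, hkle, hinb, hc⟩⟩
          rcases hs i hi hb with h1 | h0 <;> omega
        · rw [if_neg hsym, ecast, ih (k + 1) (by omega)]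
          constructor
          · rintro ⟨hall, i, hik, hi, hb, hci⟩
            exact ⟨hall, i, by omega, hi, hb, hci⟩
          · rintro ⟨hall, i, hik, hi, hb, hci⟩
            refine ⟨hall, ?_⟩
            by_contra hno
            push Not at hno
            exact hsym (hsymiff.2 (fun j hj hbj => by
              have hle := hall j hj hbj
              have hge := pvC_nonneg m idx j (pre j hj hbj)
              rcases (by omega : pvC m idx j = 0 ∨ pvC m idx j = 1) with h0 | h1
              · exact Or.inr h0
              · refine Or.inl ⟨?_, h1⟩
                by_contra hjk
                exact absurd h1 (hno j (by omega) hj hbj)))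
      · rw [show pvFixSmudge (pvTop m idx k) (pvBot m idx k) = none from by
            unfold pvFixSmudge; exact if_neg hc]
        simp only
        rw [← pvFixedAt_succ_of_not m idx k (by tauto), ecast, ih (k + 1) (by omega)]
        constructor
        · rintro ⟨hall, i, hik, hi, hb, hci⟩
          exact ⟨hall, i, by omega, hi, hb, hci⟩
        · rintro ⟨hall, i, hik, hi, hb, hci⟩
          refine ⟨hall, i, ?_, hi, hb, hci⟩
          rcases Nat.eq_or_lt_of_le hik with rfl | h
          · exact absurd hci hc
          · omega
    · rw [if_neg (by rintro ⟨-, hb⟩; rw [e2] at hb; exact hinb (by exact_mod_cast hb))]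
      rw [← pvFixedAt_succ_of_not m idx k (by tauto), ecast, ih (k + 1) (by omega)]
      constructor
      · rintro ⟨hall, i, hik, hi, hb, hci⟩
        exact ⟨hall, i, by omega, hi, hb, hci⟩
      · rintro ⟨hall, i, hik, hi, hb, hci⟩
        refine ⟨hall, i, ?_, hi, hb, hci⟩
        rcases Nat.eq_or_lt_of_le hik with rfl | h
        · exact absurd hb hinb
        · omega

lemma fixInMatrix_char (m : List String) (idx : Nat) (hidx : idx + 1 < m.length)
    (pre : ∀ i : Nat, i ≤ idx → idx + i + 1 < m.length →
      (pvTop m idx i).toList.length = (pvBot m idx i).toList.length) :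
    (pvFixSmudgeInMatrix m (idx : Int)).isSome = true ↔
      ((∀ i : Nat, i ≤ idx → idx + i + 1 < m.length → pvC m idx i ≤ 1) ∧
       (∃ i : Nat, i ≤ idx ∧ idx + i + 1 < m.length ∧ pvC m idx i = 1)) := by
  unfold pvFixSmudgeInMatrix
  have h0 := fixLoop_char m idx hidx pre (idx + 1) 0 (by omega)
  rw [pvFixedAt_zero] at h0
  rw [show (0 : Int) = ((0 : Nat) : Int) from rfl]
  rw [h0]
  constructor
  · rintro ⟨hall, i, -, hi, hb, hc⟩; exact ⟨hall, i, hi, hb, hc⟩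
  · rintro ⟨hall, i, hi, hb, hc⟩; exact ⟨hall, i, Nat.zero_le _, hi, hb, hc⟩

lemma counts_eq (m : List String) (idx : Nat) (hidx : idx + 1 < m.length)
    (pre : ∀ i : Nat, i ≤ idx → idx + i + 1 < m.length →
      (pvTop m idx i).toList.length = (pvBot m idx i).toList.length) :
    pvCountsB m (idx : Int) (min ((idx : Int) + 1) ((m.length : Int) - idx - 1)) =
      (List.range (min (idx + 1) (m.length - idx - 1))).map (fun i => pvC m idx i) := by
  unfold pvCountsB
  have ew : min ((idx : Int) + 1) ((m.length : Int) - idx - 1)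
      = ((min (idx + 1) (m.length - idx - 1) : Nat) : Int) := by
    push_cast [Nat.cast_min]; omega
  rw [ew, PySem.List.pyRange_zero_nat, List.map_map]
  apply List.map_congr_left
  intro i hi
  rw [List.mem_range] at hi
  have hile : i ≤ idx := by omega
  have hib : idx + i + 1 < m.length := by omega
  have e1 : (idx : Int) - (i : Int) = ((idx - i : Nat) : Int) := by omega
  have e2 : (idx : Int) + (i : Int) + 1 = ((idx + i + 1 : Nat) : Int) := by push_cast; ring
  simp only [Function.comp_apply]
  rw [e1, e2, PySem.List.pyGetD_natCast, PySem.List.pyGetD_natCast]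
  have : pvCountB (pvTop m idx i) (pvBot m idx i) = pvC m idx i := by
    rw [pvCountB_eq _ _ (pre i hile hib)]
    unfold pvC
    rw [pvCountA_eq _ _ (pre i hile hib)]
  exact this

lemma Bcond_iff (m : List String) (idx : Nat) (hidx : idx + 1 < m.length)
    (pre : ∀ i : Nat, i ≤ idx → idx + i + 1 < m.length →
      (pvTop m idx i).toList.length = (pvBot m idx i).toList.length) :
    (pvCountsB m (idx : Int) (min ((idx : Int) + 1) ((m.length : Int) - idx - 1)) ≠ [] ∧
      PySem.List.max? (pvCountsB m (idx : Int) (min ((idx : Int) + 1) ((m.length : Int) - idx - 1)))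
        (fun x => x) = some 1) ↔
      ((∀ i : Nat, i ≤ idx → idx + i + 1 < m.length → pvC m idx i ≤ 1) ∧
       (∃ i : Nat, i ≤ idx ∧ idx + i + 1 < m.length ∧ pvC m idx i = 1)) := by
  rw [counts_eq m idx hidx pre]
  have hw : 1 ≤ min (idx + 1) (m.length - idx - 1) := by omega
  have hmem : ∀ c : Int, c ∈ (List.range (min (idx + 1) (m.length - idx - 1))).map
      (fun i => pvC m idx i) ↔ ∃ i : Nat, i ≤ idx ∧ idx + i + 1 < m.length ∧ pvC m idx i = c := by
    intro c
    rw [List.mem_map]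
    constructor
    · rintro ⟨i, hi, rfl⟩
      rw [List.mem_range] at hi
      exact ⟨i, by omega, by omega, rfl⟩
    · rintro ⟨i, hi, hb, rfl⟩
      exact ⟨i, by rw [List.mem_range]; omega, rfl⟩
  constructor
  · rintro ⟨-, hmax⟩
    have hle := PySem.List.max?_isMax hmax
    have h1 : (1 : Int) ∈ _ := PySem.List.max?_mem hmax
    rcases (hmem 1).1 h1 with ⟨i, hi, hb, hc⟩
    refine ⟨fun i hi hb => ?_, ⟨i, hi, hb, hc⟩⟩
    exact hle _ ((hmem _).2 ⟨i, hi, hb, rfl⟩)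
  · rintro ⟨hall, i, hi, hb, hc⟩
    have hne : (List.range (min (idx + 1) (m.length - idx - 1))).map
        (fun i => pvC m idx i) ≠ [] := by
      simp only [ne_eq, List.map_eq_nil_iff, List.range_eq_nil]
      omega
    refine ⟨hne, ?_⟩
    cases hmx : PySem.List.max? ((List.range (min (idx + 1) (m.length - idx - 1))).map
        (fun i => pvC m idx i)) (fun x => x) with
    | none => exact absurd ((PySem.List.max?_eq_none_iff _ _).1 hmx) hne
    | some mx =>
      have hmxmem := PySem.List.max?_mem hmx
      rcases (hmem mx).1 hmxmem with ⟨j, hj, hbj, hcj⟩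
      have hmxle : mx ≤ 1 := hcj ▸ hall j hj hbj
      have hmxge : (1 : Int) ≤ mx :=
        PySem.List.max?_isMax hmx _ ((hmem 1).2 ⟨i, hi, hb, hc⟩)
      have : mx = 1 := le_antisymm hmxle hmxge
      rw [this]

lemma loops_eq (m : List String) (h_factor : Int)
    (pre : Pre_fix_smudge_and_test_smart m h_factor) :
    ∀ L : List Int, (∀ x ∈ L, 0 ≤ x ∧ x + 1 < (m.length : Int)) →
      pvLoopA h_factor m L = pvLoopB m h_factor L := by
  intro L
  induction L with
  | nil => intro _; rfl
  | cons x rest ih =>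
    intro hL
    have hx := hL x (List.mem_cons_self ..)
    obtain ⟨idx, rfl⟩ : ∃ i : Nat, x = (i : Int) := ⟨x.toNat, by omega⟩
    have hidx : idx + 1 < m.length := by exact_mod_cast hx.2
    simp only [pvLoopA, pvLoopB]
    by_cases hgate : (PySem.List.pyGetD m (idx : Int) "" ==
        PySem.List.pyGetD m ((idx : Int) + 1) "") = true
    · rw [if_pos hgate, if_pos hgate]
      have egate : m.getD idx "" = m.getD (idx + 1) "" := by
        rw [show ((idx : Int) + 1) = ((idx + 1 : Nat) : Int) by push_cast; ring,
            PySem.List.pyGetD_natCast, PySem.List.pyGetD_natCast, beq_iff_eq] at hgate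
        exact hgate
      have pre' : ∀ i : Nat, i ≤ idx → idx + i + 1 < m.length →
          (pvTop m idx i).toList.length = (pvBot m idx i).toList.length := by
        intro i hi hb
        exact pre idx (by omega) i (by omega) ⟨hidx, hi, hb, egate⟩
      cases hfix : pvFixSmudgeInMatrix m (idx : Int) with
      | some f =>
        have hsym : pvTestSym f (idx : Int) = true := by
          unfold pvFixSmudgeInMatrix at hfix
          exact fixLoop_some_sym m (idx : Int) _ _ _ hfix
        have hcond := (Bcond_iff m idx hidx pre').2
          ((fixInMatrix_char m idx hidx pre').1 (by rw [hfix]; rfl))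
        show (if pvTestSym f (idx : Int) = true then ((idx : Int) + 1) * h_factor
              else pvLoopA h_factor f rest) = _
        rw [if_pos hsym, if_pos hcond]
      | none =>
        show pvLoopA h_factor m rest = _
        have hncond : ¬ (pvCountsB m (idx : Int)
            (min ((idx : Int) + 1) ((m.length : Int) - idx - 1)) ≠ [] ∧
            PySem.List.max? (pvCountsB m (idx : Int)
              (min ((idx : Int) + 1) ((m.length : Int) - idx - 1))) (fun x => x) = some 1) := by
          intro hcond
          have := (fixInMatrix_char m idx hidx pre').2 ((Bcond_iff m idx hidx pre').1 hcond)
          rw [hfix] at this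
          cases this
        rw [if_neg hncond]
        exact ih (fun y hy => hL y (List.mem_cons_of_mem _ hy))
    · rw [if_neg hgate, if_neg hgate]
      exact ih (fun y hy => hL y (List.mem_cons_of_mem _ hy))

-- ===== VERDICT (by name: the statement is the Claim_ definition above) =====
theorem fix_smudge_and_test_smart_spec : Claim_equal_fix_smudge_and_test_smart := by
  intro matrix h_factor _ hpre
  unfold Spec_fix_smudge_and_test_smart fix_smudge_and_test_smart fix_smudge_and_test_smart_alt
  exact loops_eq matrix h_factor hpre _ (fun x hx => by
    rw [PySem.List.mem_pyRange_one] at hx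
    exact ⟨hx.1, by omega⟩)
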